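-- pv_equiv track=rewrite | github.com/sungho-joo/leetcode2github | src/leetcode_1737_change_minimum_characters_to_satisfy_one_of_three_conditions.py | minCharacters
-- ===== SOURCE A (Python) =====
-- from typing import Counter
--
-- def minCharacters(a: str, b: str) -> int:
--     len_a, len_b = len(a), len(b)
--     a_counter = Counter(ord(c) - 97 for c in a)
--     b_counter = Counter(ord(c) - 97 for c in b)
--
--     # Condition 3
--     res = len_a + len_b - max((a_counter + b_counter).values())
--
--     for i in range(25):
--         a_counter[i + 1] += a_counter[i]
--         b_counter[i + 1] += b_counter[i]
--
--         res = min(res, len_a - a_counter[i] + b_counter[i])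
--         res = min(res, len_b - b_counter[i] + a_counter[i])
--
--     return res
-- ===== SOURCE B (Python) =====
-- def minCharacters(a: str, b: str) -> int:
--     s = a + b
--     # Condition 3: make everything one letter = changes everything except the
--     # most frequent character; max() on the empty set raises ValueError just
--     # like A's max() on two empty strings.
--     res = len(s) - max(map(s.count, set(s)))
--     # Conditions 1/2: for each split letter, count directly how many characters
--     # of each string are lowercase letters strictly below the split.
--     for cut in range(1, 26):
--         la = sum(1 for ch in a if 0 <= ord(ch) - 97 < cut)
--         lb = sum(1 for ch in b if 0 <= ord(ch) - 97 < cut)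
--         res = min(res, len(a) - la + lb, len(b) - lb + la)
--     return res
-- ===== Notes on version B (the rewrite author's own statement) =====
-- stated objective: alternative
-- what changed: B drops the Counters and the in-place prefix-sum accumulation: condition 3 becomes len(a+b) minus the maximum of str.count over set(a+b), and conditions 1/2 directly count, for each split letter, the characters below the split with fresh scans of the two strings.
import Mathlib
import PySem

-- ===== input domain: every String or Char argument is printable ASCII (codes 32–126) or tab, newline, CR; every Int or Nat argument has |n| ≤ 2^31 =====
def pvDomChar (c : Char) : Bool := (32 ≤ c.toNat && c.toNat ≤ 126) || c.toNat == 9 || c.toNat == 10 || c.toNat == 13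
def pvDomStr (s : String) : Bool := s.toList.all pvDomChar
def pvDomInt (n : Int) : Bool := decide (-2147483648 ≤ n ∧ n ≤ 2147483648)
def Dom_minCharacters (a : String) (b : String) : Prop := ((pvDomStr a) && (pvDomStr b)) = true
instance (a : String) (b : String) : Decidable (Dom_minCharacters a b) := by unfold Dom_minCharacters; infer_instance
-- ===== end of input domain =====

-- B replaces the Counters and the in-place prefix-sum accumulation by direct
-- per-split counting scans and a count/set-based condition 3 (objective: alternative).

-- ===== PORT A =====
-- the body of A's 'for i in range(25)' loop, one step on (a_counter, b_counter, res)
def pvStepA (lenA lenB : Int) (st : PySem.Dict Int Int × PySem.Dict Int Int × Int) (i : Int) :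
    PySem.Dict Int Int × PySem.Dict Int Int × Int :=
  let ac := st.1.modify (i + 1) 0 (fun v => v + st.1.getD i 0)
  let bc := st.2.1.modify (i + 1) 0 (fun v => v + st.2.1.getD i 0)
  let r := min st.2.2 (lenA - ac.getD i 0 + bc.getD i 0)
  let r := min r (lenB - bc.getD i 0 + ac.getD i 0)
  (ac, bc, r)

-- Counter.__add__ (a_counter + b_counter), ported step for step: keep positive
-- sums for keys of self, then positive counts for keys only in other.
def pvCounterAdd (c1 c2 : PySem.Dict Int Int) : PySem.Dict Int Int :=
  let r := c1.items.foldl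
    (fun (r : PySem.Dict Int Int) p =>
      let newcount := p.2 + c2.getD p.1 0
      if 0 < newcount then r.insert p.1 newcount else r)
    PySem.Dict.empty
  c2.items.foldl
    (fun (r : PySem.Dict Int Int) p =>
      if c1.contains p.1 = false ∧ 0 < p.2 then r.insert p.1 p.2 else r)
    r

def minCharacters (a : String) (b : String) : Int :=
  let lenA := PySem.Str.len a
  let lenB := PySem.Str.len b
  let aCounter := PySem.Dict.counter (a.toList.map (fun c => ((c.toNat : Int) - 97)))
  let bCounter := PySem.Dict.counter (b.toList.map (fun c => ((c.toNat : Int) - 97)))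
  -- max() of an empty sequence raises ValueError: the 'none' case is excluded by Pre_
  let res := lenA + lenB -
    ((PySem.List.max? (pvCounterAdd aCounter bCounter).values (fun v => v)).getD 0)
  let final := (PySem.List.pyRange 0 25).foldl (pvStepA lenA lenB) (aCounter, bCounter, res)
  final.2.2

-- ===== PORT B =====
-- the body of B's 'for cut in range(1, 26)' loop: direct counting scans of both strings
def pvStepB (a b : String) (res : Int) (cut : Int) : Int :=
  let la : Int := (a.toList.countP (fun ch => decide (0 ≤ (ch.toNat : Int) - 97 ∧ (ch.toNat : Int) - 97 < cut)) : Int)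
  let lb : Int := (b.toList.countP (fun ch => decide (0 ≤ (ch.toNat : Int) - 97 ∧ (ch.toNat : Int) - 97 < cut)) : Int)
  min (min res ((a.toList.length : Int) - la + lb)) ((b.toList.length : Int) - lb + la)

def minCharacters_alt (a : String) (b : String) : Int :=
  let s := a.toList ++ b.toList
  -- max(map(s.count, set(s))): s.count ch on a 1-char needle is the char count;
  -- max() over the empty set raises ValueError: the 'none' case is excluded by Pre_
  let res := (s.length : Int) -
    ((PySem.List.max? ((PySem.Set.ofList s).map (fun ch => (s.count ch : Int))) (fun v => v)).getD 0)
  (PySem.List.pyRange 1 26).foldl (pvStepB a b) res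

-- ===== PRECONDITION & SPEC =====
-- Pre_ excludes only the pair of two empty strings, on which A's max() (and B's) raises ValueError.
def Pre_minCharacters (a : String) (b : String) : Prop := a.toList ++ b.toList ≠ []
instance (a : String) (b : String) : Decidable (Pre_minCharacters a b) := by unfold Pre_minCharacters; infer_instance
def pvWitness_minCharacters : String × String := ("ab", "b")
def Spec_minCharacters (a : String) (b : String) (out : Int) : Prop := out = minCharacters_alt a b
instance (a : String) (b : String) (out : Int) : Decidable (Spec_minCharacters a b out) := by unfold Spec_minCharacters; infer_instance

-- ===== CLAIM (what is proved, stated in full; the proofs are below) =====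
def Claim_equal_minCharacters : Prop := ∀ (a : String) (b : String), Dom_minCharacters a b → Pre_minCharacters a b → Spec_minCharacters a b (minCharacters a b)

-- ===== LEMMAS AND PROOFS =====

-- the key of a character, and prefix counts of the two letter-multisets
def pvF (c : Char) : Int := (c.toNat : Int) - 97
def pvPref (m : List Int) (i : Int) : Int := (m.countP (fun k => decide (0 ≤ k ∧ k ≤ i)) : Int)

lemma pvF_inj : Function.Injective pvF := by
  intro c d h
  unfold pvF at h
  have h2 : c.toNat = d.toNat := by omega
  rw [← Char.ofNat_toNat c, ← Char.ofNat_toNat d, h2]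

lemma pvPref_succ (m : List Int) (s : Int) (hs : 0 ≤ s) :
    pvPref m (s + 1) = pvPref m s + (m.count (s + 1) : Int) := by
  unfold pvPref
  rw [List.count_eq_countP]
  induction m with
  | nil => simp
  | cons x t ih =>
    simp only [List.countP_cons, decide_eq_true_eq, beq_iff_eq]
    push_cast
    split_ifs <;> omega

lemma pvPref_zero (m : List Int) : pvPref m 0 = (m.count 0 : Int) := by
  unfold pvPref
  rw [List.count_eq_countP]
  congr 1
  apply List.countP_congr
  intro x _
  by_cases h : x = 0
  · subst h; simp
  · simp [h]; omega

-- A's loop: after the prefix-sum accumulation, the candidate at i uses exactly pvPref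
lemma pvLoopA (lenA lenB : Int) (ma mb : List Int) :
    ∀ (n s : Nat) (da db : PySem.Dict Int Int) (res : Int),
    (∀ j : Int, 0 ≤ j → da.getD j 0 = if j ≤ (s : Int) then pvPref ma j else (ma.count j : Int)) →
    (∀ j : Int, 0 ≤ j → db.getD j 0 = if j ≤ (s : Int) then pvPref mb j else (mb.count j : Int)) →
    (((List.range' s n).map (fun k : Nat => (k : Int))).foldl (pvStepA lenA lenB) (da, db, res)).2.2
    = (List.range' s n).foldl
        (fun (r : Int) (i : Nat) => min (min r (lenA - pvPref ma (i : Int) + pvPref mb (i : Int)))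
          (lenB - pvPref mb (i : Int) + pvPref ma (i : Int))) res := by
  intro n
  induction n with
  | zero => intro s da db res _ _; simp [List.range']
  | succ n ih =>
    intro s da db res ha hb
    rw [List.range'_succ, List.map_cons, List.foldl_cons, List.foldl_cons]
    have hs0 : (0 : Int) ≤ (s : Int) := Int.natCast_nonneg s
    have hag : (da.modify ((s : Int) + 1) 0 (fun v => v + da.getD (s : Int) 0)).getD (s : Int) 0
        = pvPref ma (s : Int) := by
      rw [PySem.Dict.getD_modify, if_neg (by omega), ha _ hs0, if_pos le_rfl]
    have hbg : (db.modify ((s : Int) + 1) 0 (fun v => v + db.getD (s : Int) 0)).getD (s : Int) 0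
        = pvPref mb (s : Int) := by
      rw [PySem.Dict.getD_modify, if_neg (by omega), hb _ hs0, if_pos le_rfl]
    have key : pvStepA lenA lenB (da, db, res) (s : Int)
        = (da.modify ((s : Int) + 1) 0 (fun v => v + da.getD (s : Int) 0),
           db.modify ((s : Int) + 1) 0 (fun v => v + db.getD (s : Int) 0),
           min (min res (lenA - pvPref ma (s : Int) + pvPref mb (s : Int)))
             (lenB - pvPref mb (s : Int) + pvPref ma (s : Int))) := by
      simp only [pvStepA]
      rw [hag, hbg]
    rw [key]
    have ha' : ∀ j : Int, 0 ≤ j →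
        (da.modify ((s : Int) + 1) 0 (fun v => v + da.getD (s : Int) 0)).getD j 0
        = if j ≤ ((s + 1 : Nat) : Int) then pvPref ma j else (ma.count j : Int) := by
      intro j hj
      rw [PySem.Dict.getD_modify]
      by_cases hje : j = (s : Int) + 1
      · rw [if_pos hje, ha _ hs0, if_pos le_rfl,
          ha ((s : Int) + 1) (by omega), if_neg (by omega), if_pos (by push_cast; omega), hje,
          pvPref_succ _ _ hs0]
        ring
      · rw [if_neg hje, ha _ hj]
        have : (j ≤ (s : Int)) ↔ (j ≤ ((s + 1 : Nat) : Int)) := by push_cast; omega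
        by_cases hle : j ≤ (s : Int)
        · rw [if_pos hle, if_pos (this.mp hle)]
        · rw [if_neg hle, if_neg (fun hc => hle (by push_cast at hc ⊢; omega))]
    have hb' : ∀ j : Int, 0 ≤ j →
        (db.modify ((s : Int) + 1) 0 (fun v => v + db.getD (s : Int) 0)).getD j 0
        = if j ≤ ((s + 1 : Nat) : Int) then pvPref mb j else (mb.count j : Int) := by
      intro j hj
      rw [PySem.Dict.getD_modify]
      by_cases hje : j = (s : Int) + 1
      · rw [if_pos hje, hb _ hs0, if_pos le_rfl,
          hb ((s : Int) + 1) (by omega), if_neg (by omega), if_pos (by push_cast; omega), hje,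
          pvPref_succ _ _ hs0]
        ring
      · rw [if_neg hje, hb _ hj]
        by_cases hle : j ≤ (s : Int)
        · rw [if_pos hle, if_pos (by push_cast at hle ⊢; omega)]
        · rw [if_neg hle, if_neg (fun hc => hle (by push_cast at hc ⊢; omega))]
    exact ih (s + 1) _ _ _ ha' hb'

lemma pvRange' : ∀ (n s : Nat),
    PySem.List.pyRange (s : Int) ((s + n : Nat) : Int) = (List.range' s n).map (fun k : Nat => (k : Int)) := by
  intro n
  induction n with
  | zero => intro s; simp [PySem.List.pyRange, List.range']
  | succ n ih =>
    intro s
    rw [PySem.List.pyRange_one_cons (by push_cast; omega : (s : Int) < ((s + (n + 1) : Nat) : Int))]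
    rw [List.range'_succ, List.map_cons]
    congr 1
    have e1 : (s : Int) + 1 = ((s + 1 : Nat) : Int) := by push_cast; ring
    have e2 : ((s + (n + 1) : Nat) : Int) = (((s + 1) + n : Nat) : Int) := by push_cast; ring
    rw [e1, e2]
    exact ih (s + 1)

lemma pvCnt_eq (l : List Char) (s : Int) :
    (l.countP (fun ch => decide (0 ≤ (ch.toNat : Int) - 97 ∧ (ch.toNat : Int) - 97 < s + 1)))
    = (l.map pvF).countP (fun k => decide (0 ≤ k ∧ k ≤ s)) := by
  rw [List.countP_map]
  apply List.countP_congr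
  intro x _
  simp only [Function.comp_apply, pvF]
  simp only [decide_eq_true_eq]
  omega

-- B's loop at cut = i+1 computes exactly A's candidate at i
lemma pvLoopB (a b : String) :
    ∀ (n s : Nat) (res : Int),
    ((List.range' (s + 1) n).map (fun k : Nat => (k : Int))).foldl (pvStepB a b) res
    = (List.range' s n).foldl
        (fun (r : Int) (i : Nat) => min (min r ((a.toList.length : Int) - pvPref (a.toList.map pvF) (i : Int)
            + pvPref (b.toList.map pvF) (i : Int)))
          ((b.toList.length : Int) - pvPref (b.toList.map pvF) (i : Int)
            + pvPref (a.toList.map pvF) (i : Int))) res := by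
  intro n
  induction n with
  | zero => intro s res; simp [List.range']
  | succ n ih =>
    intro s res
    rw [List.range'_succ, List.range'_succ, List.map_cons, List.foldl_cons, List.foldl_cons]
    have key : pvStepB a b res ((s + 1 : Nat) : Int)
        = min (min res ((a.toList.length : Int) - pvPref (a.toList.map pvF) (s : Int)
            + pvPref (b.toList.map pvF) (s : Int)))
          ((b.toList.length : Int) - pvPref (b.toList.map pvF) (s : Int)
            + pvPref (a.toList.map pvF) (s : Int)) := by
      simp only [pvStepB, pvPref]
      rw [show ((s + 1 : Nat) : Int) = (s : Int) + 1 by push_cast; ring]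
      rw [pvCnt_eq a.toList (s : Int), pvCnt_eq b.toList (s : Int)]
    rw [key]
    exact ih (s + 1) _

-- items of A's Counter sum over the two mapped letter lists
lemma pvItemsAdd (ma mb : List Int) :
    (pvCounterAdd (PySem.Dict.counter ma) (PySem.Dict.counter mb)).items
    = (PySem.Set.ofList ma).map (fun k => (k, (ma.count k : Int) + (mb.count k : Int)))
      ++ ((PySem.Set.ofList mb).filter (fun k => !ma.contains k)).map
          (fun k => (k, (mb.count k : Int))) := by
  simp only [pvCounterAdd]
  rw [PySem.Dict.items_counter ma, PySem.Dict.items_counter mb]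
  -- the first loop always takes the insert branch (counts are positive)
  rw [PySem.List.foldl_congr_mem _
      (fun (r : PySem.Dict Int Int) (p : Int × Int) =>
        if 0 < p.2 + (PySem.Dict.counter mb).getD p.1 0 then r.insert p.1 (p.2 + (PySem.Dict.counter mb).getD p.1 0) else r)
      (fun (r : PySem.Dict Int Int) (p : Int × Int) => r.insert p.1 (p.2 + (PySem.Dict.counter mb).getD p.1 0))
      PySem.Dict.empty
      (by
        intro acc p hp
        rcases List.mem_map.mp hp with ⟨k, hk, rfl⟩
        have hk' : k ∈ ma := (PySem.Set.mem_ofList ma k).mp hk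
        have h1 : 0 < ma.count k := List.count_pos_iff.mpr hk'
        dsimp only
        rw [PySem.Dict.getD_counter]
        rw [if_pos (by omega)])]
  -- the second loop is a fold of inserts over the keys passing its test
  rw [PySem.List.foldl_ite_eq_foldl_filter
      (fun p : Int × Int => (PySem.Dict.counter ma).contains p.1 = false ∧ 0 < p.2)
      (fun (r : PySem.Dict Int Int) (p : Int × Int) => r.insert p.1 p.2)]
  -- keys of the dict built by the first loop
  have hl1 : ((PySem.Set.ofList ma).map (fun k => (k, (ma.count k : Int)))).map Prod.fst
      = PySem.Set.ofList ma := by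
    rw [List.map_map]; simp [Function.comp_def]
  have hkeys : (((PySem.Set.ofList ma).map (fun k => (k, (ma.count k : Int)))).foldl
      (fun (r : PySem.Dict Int Int) (p : Int × Int) => r.insert p.1 (p.2 + (PySem.Dict.counter mb).getD p.1 0))
      PySem.Dict.empty).keys
      = PySem.Set.ofList (((PySem.Set.ofList ma).map (fun k => (k, (ma.count k : Int)))).map Prod.fst) := by
    rw [PySem.Dict.keys_foldl_insert_key]
    rfl
  -- append the second loop's fresh keys
  rw [PySem.Dict.items_foldl_insert_fresh _ Prod.fst Prod.snd _
      (by
        intro p hp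
        rcases List.mem_filter.mp hp with ⟨hmem, hpred⟩
        rcases List.mem_map.mp hmem with ⟨k, hk, rfl⟩
        simp only [decide_eq_true_eq] at hpred
        have hknot : ¬ k ∈ ma := by
          have := hpred.1
          rw [PySem.Dict.contains_counter, List.contains_eq_mem] at this
          simpa using this
        cases hcc : (((PySem.Set.ofList ma).map (fun k => (k, (ma.count k : Int)))).foldl
            (fun (r : PySem.Dict Int Int) (p : Int × Int) => r.insert p.1 (p.2 + (PySem.Dict.counter mb).getD p.1 0))
            PySem.Dict.empty).contains (k, (mb.count k : Int)).1 with
        | false => rfl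
        | true =>
          exfalso
          have hmemk := (PySem.Dict.contains_iff_mem_keys _ _).mp hcc
          rw [hkeys, hl1] at hmemk
          exact hknot ((PySem.Set.mem_ofList ma k).mp ((PySem.Set.mem_ofList _ _).mp hmemk)))
      (by
        have hnd2 : (((PySem.Set.ofList mb).map (fun k => (k, (mb.count k : Int)))).map Prod.fst).Nodup := by
          rw [List.map_map]; simp [Function.comp_def]
        exact List.Nodup.sublist (List.Sublist.map Prod.fst List.filter_sublist) hnd2)]
  -- first loop's items
  rw [PySem.Dict.items_foldl_insert_fresh _ Prod.fst
      (fun p : Int × Int => p.2 + (PySem.Dict.counter mb).getD p.1 0) _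
      (fun p _ => PySem.Dict.contains_empty _)
      (by rw [List.map_map]; simp [Function.comp_def])]
  -- identify the two sides
  have hpart1 : PySem.Dict.empty.items (κ := Int) (ν := Int)
      ++ ((PySem.Set.ofList ma).map (fun k => (k, (ma.count k : Int)))).map
          (fun p => (p.1, p.2 + (PySem.Dict.counter mb).getD p.1 0))
      = (PySem.Set.ofList ma).map (fun k => (k, (ma.count k : Int) + (mb.count k : Int))) := by
    rw [List.map_map]
    simp only [PySem.Dict.getD_counter]
    rfl
  have hpart2 : (List.filter (fun p : Int × Int => decide ((PySem.Dict.counter ma).contains p.1 = false ∧ 0 < p.2))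
        ((PySem.Set.ofList mb).map (fun k => (k, (mb.count k : Int))))).map (fun a => (Prod.fst a, Prod.snd a))
      = ((PySem.Set.ofList mb).filter (fun k => !ma.contains k)).map (fun k => (k, (mb.count k : Int))) := by
    simp only [Prod.mk.eta, List.map_id_fun', id]
    rw [List.filter_map]
    congr 1
    apply List.filter_congr
    intro k hk
    have hkb : k ∈ mb := (PySem.Set.mem_ofList mb k).mp hk
    have hpos : (0 : Int) < ((mb.count k : Nat) : Int) := by
      have := List.count_pos_iff.mpr hkb
      omega
    cases hc : ma.contains k with
    | false =>
      have hnotma : k ∉ ma := by simpa [List.contains_eq_mem] using hc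
      simp [PySem.Dict.contains_counter, hnotma, hkb, List.count_pos_iff]
    | true =>
      have hma : k ∈ ma := by simpa [List.contains_eq_mem] using hc
      simp [PySem.Dict.contains_counter, hma]
  rw [← hpart1, ← hpart2]

lemma pvMemValsA (aL bL : List Char) (v : Int) :
    v ∈ (pvCounterAdd (PySem.Dict.counter (aL.map pvF)) (PySem.Dict.counter (bL.map pvF))).values
    ↔ ∃ ch, ch ∈ aL ++ bL ∧ v = ((aL ++ bL).count ch : Int) := by
  have hv : (pvCounterAdd (PySem.Dict.counter (aL.map pvF)) (PySem.Dict.counter (bL.map pvF))).values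
      = (pvCounterAdd (PySem.Dict.counter (aL.map pvF)) (PySem.Dict.counter (bL.map pvF))).items.map Prod.snd := rfl
  rw [hv, pvItemsAdd, List.map_append, List.map_map, List.map_map]
  constructor
  · intro h
    rcases List.mem_append.mp h with h1 | h2
    · rcases List.mem_map.mp h1 with ⟨k, hk, hval⟩
      rcases List.mem_map.mp ((PySem.Set.mem_ofList _ _).mp hk) with ⟨ch, hch, rfl⟩
      refine ⟨ch, List.mem_append.mpr (Or.inl hch), ?_⟩
      simp only [Function.comp_apply] at hval
      rw [← hval, List.count_append,
        List.count_map_of_injective _ _ pvF_inj, List.count_map_of_injective _ _ pvF_inj]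
      push_cast
      ring
    · rcases List.mem_map.mp h2 with ⟨k, hk, hval⟩
      rcases List.mem_filter.mp hk with ⟨hkmem, hkf⟩
      rcases List.mem_map.mp ((PySem.Set.mem_ofList _ _).mp hkmem) with ⟨ch, hch, rfl⟩
      simp only [List.contains_eq_mem, Bool.not_eq_eq_eq_not, Bool.not_true, decide_eq_false_iff_not] at hkf
      have hnot : ch ∉ aL := fun hin => hkf (List.mem_map_of_mem hin)
      refine ⟨ch, List.mem_append.mpr (Or.inr hch), ?_⟩
      simp only [Function.comp_apply] at hval
      rw [← hval, List.count_append, List.count_map_of_injective _ _ pvF_inj,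
        List.count_eq_zero.mpr hnot]
      push_cast
      ring
  · rintro ⟨ch, hch, rfl⟩
    by_cases hin : ch ∈ aL
    · refine List.mem_append.mpr (Or.inl (List.mem_map.mpr ⟨pvF ch,
        (PySem.Set.mem_ofList _ _).mpr (List.mem_map_of_mem hin), ?_⟩))
      simp only [Function.comp_apply]
      rw [List.count_append, List.count_map_of_injective _ _ pvF_inj,
        List.count_map_of_injective _ _ pvF_inj]
      push_cast
      ring
    · have hchb : ch ∈ bL := by
        rcases List.mem_append.mp hch with h | h
        · exact absurd h hin
        · exact h
      have hnotm : pvF ch ∉ aL.map pvF := by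
        intro hm
        rcases List.mem_map.mp hm with ⟨ch2, hch2, heq⟩
        exact hin (pvF_inj heq ▸ hch2)
      refine List.mem_append.mpr (Or.inr (List.mem_map.mpr ⟨pvF ch, ?_, ?_⟩))
      · refine List.mem_filter.mpr ⟨(PySem.Set.mem_ofList _ _).mpr (List.mem_map_of_mem hchb), ?_⟩
        simp [List.contains_eq_mem, hnotm]
      · simp only [Function.comp_apply]
        rw [List.count_append, List.count_map_of_injective _ _ pvF_inj,
          List.count_eq_zero.mpr hin]
        push_cast
        ring

lemma pvMemValsB (sL : List Char) (v : Int) :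
    v ∈ (PySem.Set.ofList sL).map (fun ch => (sL.count ch : Int))
    ↔ ∃ ch, ch ∈ sL ∧ v = (sL.count ch : Int) := by
  constructor
  · rintro h
    rcases List.mem_map.mp h with ⟨ch, hch, rfl⟩
    exact ⟨ch, (PySem.Set.mem_ofList _ _).mp hch, rfl⟩
  · rintro ⟨ch, hch, rfl⟩
    exact List.mem_map.mpr ⟨ch, (PySem.Set.mem_ofList _ _).mpr hch, rfl⟩

lemma pvMax_eq (aL bL : List Char) (hpre : aL ++ bL ≠ []) :
    ((PySem.List.max?
        (pvCounterAdd (PySem.Dict.counter (aL.map pvF)) (PySem.Dict.counter (bL.map pvF))).values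
        (fun v => v)).getD 0)
    = ((PySem.List.max? ((PySem.Set.ofList (aL ++ bL)).map (fun ch => ((aL ++ bL).count ch : Int)))
        (fun v => v)).getD 0) := by
  obtain ⟨c0, hc0⟩ := List.exists_mem_of_ne_nil _ hpre
  have hB : (PySem.Set.ofList (aL ++ bL)).map (fun ch => ((aL ++ bL).count ch : Int)) ≠ [] :=
    List.ne_nil_of_mem ((pvMemValsB _ _).mpr ⟨c0, hc0, rfl⟩)
  have hA : (pvCounterAdd (PySem.Dict.counter (aL.map pvF)) (PySem.Dict.counter (bL.map pvF))).values ≠ [] :=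
    List.ne_nil_of_mem ((pvMemValsA aL bL _).mpr ⟨c0, hc0, rfl⟩)
  cases hma : PySem.List.max?
      (pvCounterAdd (PySem.Dict.counter (aL.map pvF)) (PySem.Dict.counter (bL.map pvF))).values
      (fun v : Int => v) with
  | none => exact absurd ((PySem.List.max?_eq_none_iff _ _).mp hma) hA
  | some m1 =>
    cases hmb : PySem.List.max?
        ((PySem.Set.ofList (aL ++ bL)).map (fun ch => ((aL ++ bL).count ch : Int)))
        (fun v : Int => v) with
    | none => exact absurd ((PySem.List.max?_eq_none_iff _ _).mp hmb) hB
    | some m2 =>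
      simp only [Option.getD_some]
      apply le_antisymm
      · exact PySem.List.max?_isMax hmb _
          ((pvMemValsB _ _).mpr ((pvMemValsA aL bL m1).mp (PySem.List.max?_mem hma)))
      · exact PySem.List.max?_isMax hma _
          ((pvMemValsA aL bL m2).mpr ((pvMemValsB _ _).mp (PySem.List.max?_mem hmb)))

-- ===== VERDICT (by name: the statement is the Claim_ definition above) =====
theorem minCharacters_spec : Claim_equal_minCharacters := by
  intro a b _ hpre
  unfold Spec_minCharacters
  have hrA : PySem.List.pyRange 0 25 = (List.range' 0 25).map (fun k : Nat => (k : Int)) := by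
    simpa using pvRange' 25 0
  have hrB : PySem.List.pyRange 1 26 = (List.range' (0 + 1) 25).map (fun k : Nat => (k : Int)) := by
    simpa using pvRange' 25 1
  have hbase : ∀ (m : List Int) (j : Int), 0 ≤ j →
      (PySem.Dict.counter m).getD j 0 = if j ≤ ((0 : Nat) : Int) then pvPref m j else (m.count j : Int) := by
    intro m j hj
    rw [PySem.Dict.getD_counter]
    by_cases h : j ≤ ((0 : Nat) : Int)
    · rw [if_pos h]
      have h0 : j = 0 := by push_cast at h; omega
      rw [h0, pvPref_zero]
    · rw [if_neg h]
  simp only [minCharacters, minCharacters_alt]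
  simp only [show (fun c : Char => ((c.toNat : Int) - 97)) = pvF from rfl]
  rw [hrA, hrB]
  rw [pvLoopA (PySem.Str.len a) (PySem.Str.len b) (a.toList.map pvF) (b.toList.map pvF) 25 0 _ _ _
      (hbase _) (hbase _)]
  rw [pvLoopB a b 25 0]
  have hlen : ∀ (r : Int), ∀ i ∈ List.range' 0 25,
      min (min r (PySem.Str.len a - pvPref (a.toList.map pvF) (i : Int) + pvPref (b.toList.map pvF) (i : Int)))
        (PySem.Str.len b - pvPref (b.toList.map pvF) (i : Int) + pvPref (a.toList.map pvF) (i : Int))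
      = min (min r ((a.toList.length : Int) - pvPref (a.toList.map pvF) (i : Int) + pvPref (b.toList.map pvF) (i : Int)))
        ((b.toList.length : Int) - pvPref (b.toList.map pvF) (i : Int) + pvPref (a.toList.map pvF) (i : Int)) := by
    intro r i _
    rw [PySem.Str.len_eq, PySem.Str.len_eq]
  rw [PySem.List.foldl_congr_mem _ _ _ _ hlen]
  congr 1
  rw [PySem.Str.len_eq, PySem.Str.len_eq, pvMax_eq a.toList b.toList hpre]
  push_cast [List.length_append]
  ring
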